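-- pv_equiv track=rewrite | github.com/ivan-danilenko/klrw_project | klrw/stable_envelopes.py | braid_from_marked_state
-- ===== SOURCE A (Python) =====
-- def braid_from_marked_state(left_state, right_state):
--     """
--     We assume that both states have marks that make each strand type unique
--     """
--     # make reduced word by finding elements of the Lehmer cocode
--     rw = []
--     permutation = {
--         left_index: right_state.index(mark)
--         for left_index, mark in enumerate(left_state)
--     }
--     for left_index, mark in enumerate(left_state):
--         right_index = permutation[left_index]
--         cocode_element = sum(
--             1 for i in range(left_index) if permutation[i] > right_index
--         )
--         piece = [
--             j + 1 for j in range(left_index - 1, left_index - cocode_element - 1, -1)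
--         ]
--         rw += piece
--
--     word = tuple(rw)
--     return word
-- ===== SOURCE B (Python) =====
-- def braid_from_marked_state(left_state, right_state):
--     # first-occurrence index of each mark in right_state, built once
--     pos = {}
--     for i, m in enumerate(right_state):
--         if m not in pos:
--             pos[m] = i
--     rw = []
--     seen = []  # sorted list of the right-indices of the strands placed so far
--     for k, m in enumerate(left_state):
--         r = pos[m]
--         # bisect_right(seen, r), hand-written (no imports): insertion point after equals
--         lo, hi = 0, len(seen)
--         while lo < hi:
--             mid = (lo + hi) // 2
--             if r < seen[mid]:
--                 hi = mid
--             else: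
--                 lo = mid + 1
--         c = len(seen) - lo  # earlier strands whose right-index exceeds r
--         rw.extend(range(k, k - c, -1))
--         seen.insert(lo, r)
--     return tuple(rw)
-- ===== Notes on version B (the rewrite author's own statement) =====
-- stated objective: faster
-- what changed: A recomputes each strand's right-index with a linear .index scan and recounts the whole prefix for every inversion count (quadratic rescans); B builds a first-occurrence position dictionary once and keeps the already-placed right-indices in a sorted list queried by hand-written binary search, so each strand costs a dict lookup plus O(log n) search and one insertion.
import Mathlib
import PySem

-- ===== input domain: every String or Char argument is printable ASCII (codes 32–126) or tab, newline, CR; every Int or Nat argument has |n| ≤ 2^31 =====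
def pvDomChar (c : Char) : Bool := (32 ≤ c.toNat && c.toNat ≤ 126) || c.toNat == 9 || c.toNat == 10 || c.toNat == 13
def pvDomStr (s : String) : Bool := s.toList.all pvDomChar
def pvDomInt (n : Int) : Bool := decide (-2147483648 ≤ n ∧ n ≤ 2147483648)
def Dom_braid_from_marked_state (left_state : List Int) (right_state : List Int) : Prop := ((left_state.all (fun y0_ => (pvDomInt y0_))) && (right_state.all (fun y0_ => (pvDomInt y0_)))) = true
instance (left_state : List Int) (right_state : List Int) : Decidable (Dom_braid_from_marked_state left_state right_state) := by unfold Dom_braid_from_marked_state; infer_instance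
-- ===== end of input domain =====

-- B replaces A's per-strand full rescans (repeated .index and a prefix recount for every strand)
-- by a position dictionary built once plus an incrementally maintained sorted list queried by
-- hand-written binary search; equivalence of the RETURN value is proved under Pre_ (every mark
-- of left_state occurs in right_state; otherwise both Pythons raise).

-- ===== PORT A =====
def braid_from_marked_state (left_state : List Int) (right_state : List Int) : List Int :=
  -- permutation = {left_index: right_state.index(mark) ...}; index? = none is Python's ValueError
  match (PySem.List.enumerate left_state).foldlM
      (fun (d : PySem.Dict Int Int) p =>
        (PySem.List.index? right_state p.2).map (fun r => d.insert p.1 (r : Int)))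
      PySem.Dict.empty with
  | none => []   -- Python raises ValueError here; excluded by Pre_
  | some permutation =>
    (PySem.List.enumerate left_state).foldl
      (fun rw p =>
        let right_index := permutation.getD p.1 0   -- key p.1 always present: KeyError impossible
        let cocode_element :=
          ((PySem.List.pyRange 0 p.1 1).map
            (fun i => if permutation.getD i 0 > right_index then (1 : Int) else 0)).sum
        rw ++ (PySem.List.pyRange (p.1 - 1) (p.1 - cocode_element - 1) (-1)).map (fun j => j + 1))
      []

-- ===== PORT B =====
def braid_from_marked_state_alt (left_state : List Int) (right_state : List Int) : List Int :=
  let pos := (PySem.List.enumerate right_state).foldl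
      (fun (d : PySem.Dict Int Int) p => if d.contains p.2 then d else d.insert p.2 p.1)
      PySem.Dict.empty
  -- pos[m] raising KeyError is the none of get?; the lo/hi/mid while loop of Source B is exactly
  -- CPython's bisect_right, ported as PySem.List.bisectRight
  match (PySem.List.enumerate left_state).foldlM
      (fun (st : List Int × List Int) p =>
        (pos.get? p.2).map (fun r =>
          let lo := PySem.List.bisectRight st.2 r
          let c : Int := (st.2.length : Int) - (lo : Int)
          (st.1 ++ PySem.List.pyRange p.1 (p.1 - c) (-1),
           PySem.List.insert st.2 (lo : Int) r)))
      (([] : List Int), ([] : List Int)) with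
  | none => []   -- Python raises KeyError here; excluded by Pre_
  | some st => st.1

-- ===== PRECONDITION & SPEC =====
-- Pre_ excludes exactly the inputs where a mark of left_state is absent from right_state:
-- there A raises ValueError (and B raises KeyError), so A returns no value.
def Pre_braid_from_marked_state (left_state : List Int) (right_state : List Int) : Prop :=
  ∀ m ∈ left_state, m ∈ right_state
instance (left_state : List Int) (right_state : List Int) : Decidable (Pre_braid_from_marked_state left_state right_state) := by unfold Pre_braid_from_marked_state; infer_instance
def pvWitness_braid_from_marked_state : List Int × List Int := ([2, 0, 1], [0, 1, 2])
def Spec_braid_from_marked_state (left_state : List Int) (right_state : List Int) (out : List Int) : Prop := out = braid_from_marked_state_alt left_state right_state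
instance (left_state : List Int) (right_state : List Int) (out : List Int) : Decidable (Spec_braid_from_marked_state left_state right_state out) := by unfold Spec_braid_from_marked_state; infer_instance

-- ===== CLAIM (what is proved, stated in full; the proofs are below) =====
def Claim_equal_braid_from_marked_state : Prop := ∀ (left_state : List Int) (right_state : List Int), Dom_braid_from_marked_state left_state right_state → Pre_braid_from_marked_state left_state right_state → Spec_braid_from_marked_state left_state right_state (braid_from_marked_state left_state right_state)

-- ===== LEMMAS AND PROOFS =====

-- the right-index of a mark (both programs compute it: A by .index, B by the pos dict)
def pvVal (rs : List Int) (m : Int) : Int := (((PySem.List.index? rs m).getD 0 : Nat) : Int)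

theorem posFold_get (rs : List Int) : ∀ (s : Int) (d : PySem.Dict Int Int) (m : Int),
    ((PySem.List.enumerate rs s).foldl
      (fun (d : PySem.Dict Int Int) p => if d.contains p.2 then d else d.insert p.2 p.1) d).get? m
    = if d.contains m then d.get? m
      else (PySem.List.index? rs m).map (fun i => s + (i : Int)) := by
  induction rs with
  | nil =>
    intro s d m
    simp only [PySem.List.enumerate, List.foldl_nil]
    split
    · rfl
    · rename_i hc
      simp only [Bool.not_eq_true] at hc
      rw [(PySem.Dict.get?_eq_none_iff_contains d m).mpr hc]
      simp [PySem.List.index?_eq_idxOf?]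
  | cons r t ih =>
    intro s d m
    rw [PySem.List.enumerate_cons, List.foldl_cons, ih]
    by_cases hm : m = r
    · subst hm
      by_cases hc : d.contains m
      · simp [hc]
      · rw [PySem.List.index?_cons_self]
        simp [hc, PySem.Dict.contains_insert_self, PySem.Dict.get?_insert_self]
    · have hidx : PySem.List.index? (r :: t) m
          = Option.map (fun x => x + 1) (PySem.List.index? t m) :=
        PySem.List.index?_cons_of_ne t (fun h => hm h.symm)
      rw [hidx]
      have hci : (d.insert r s).contains m = d.contains m := by
        rw [PySem.Dict.contains_insert]; simp [hm]
      by_cases hc : d.contains m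
      · by_cases hcr : d.contains r
        · simp [hcr, hc]
        · simp [hcr, hc, hci, PySem.Dict.get?_insert_of_ne d s hm]
      · by_cases hcr : d.contains r
        · simp only [hcr, if_true, hc, if_false]
          cases PySem.List.index? t m with
          | none => simp
          | some x => simp; push_cast; ring
        · cases h : PySem.List.index? t m with
          | none => simp [h, hcr, hc, hci, PySem.Dict.get?_insert_of_ne d s hm]
          | some x =>
            simp [h, hcr, hc, hci, PySem.Dict.get?_insert_of_ne d s hm]
            push_cast; ring

-- A's dict comprehension succeeds under Pre_ and stores pvVal
theorem permFold_some (rs : List Int) : ∀ (ls : List Int) (s : Int) (d : PySem.Dict Int Int),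
    (∀ m ∈ ls, m ∈ rs) →
    (PySem.List.enumerate ls s).foldlM
      (fun (d : PySem.Dict Int Int) p =>
        (PySem.List.index? rs p.2).map (fun r => d.insert p.1 (r : Int))) d
    = some ((PySem.List.enumerate ls s).foldl
        (fun (d : PySem.Dict Int Int) p => d.insert p.1 (pvVal rs p.2)) d) := by
  intro ls
  induction ls with
  | nil => intro s d _; simp [PySem.List.enumerate]
  | cons m t ih =>
    intro s d h
    obtain ⟨n, hn⟩ := Option.isSome_iff_exists.mp
      ((PySem.List.index?_isSome_iff rs m).mpr (h m (List.mem_cons_self)))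
    rw [PySem.List.enumerate_cons, List.foldlM_cons, List.foldl_cons, hn]
    simp only [Option.map_some, pure, Option.bind_eq_bind, Option.bind_some]
    have hv : pvVal rs m = (n : Int) := by
      rw [pvVal, hn, Option.getD_some]
    rw [hv] at *
    exact ih (s + 1) _ (fun x hx => h x (List.mem_cons_of_mem _ hx))

-- lookup in the insert-fold dict
theorem permFold_get (rs : List Int) : ∀ (ls : List Int) (s : Int) (d : PySem.Dict Int Int) (q : Int),
    ((PySem.List.enumerate ls s).foldl
        (fun (d : PySem.Dict Int Int) p => d.insert p.1 (pvVal rs p.2)) d).get? q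
    = if h : s ≤ q ∧ q < s + ls.length
      then some (pvVal rs (PySem.List.pyGetD ls (q - s) 0))
      else d.get? q := by
  intro ls
  induction ls with
  | nil =>
    intro s d q
    simp only [PySem.List.enumerate, List.foldl_nil, List.length_nil]
    rw [dif_neg (by omega)]
  | cons m t ih =>
    intro s d q
    rw [PySem.List.enumerate_cons, List.foldl_cons, ih]
    by_cases h1 : s + 1 ≤ q ∧ q < s + 1 + t.length
    · rw [dif_pos h1, dif_pos (by simp only [List.length_cons]; push_cast; omega)]
      have : PySem.List.pyGetD (m :: t) (q - s) 0 = PySem.List.pyGetD t (q - s - 1) 0 := by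
        have h0 : (0:Int) ≤ q - s - 1 := by omega
        rw [PySem.List.pyGetD_of_nonneg _ _ (by omega), PySem.List.pyGetD_of_nonneg _ _ h0]
        have : (q - s).toNat = (q - s - 1).toNat + 1 := by omega
        rw [this]
        rfl
      rw [this]
      congr 1
      ring_nf
    · rw [dif_neg h1]
      by_cases h2 : q = s
      · subst h2
        rw [dif_pos ⟨le_refl _, by simp only [List.length_cons]; push_cast; omega⟩, PySem.Dict.get?_insert_self]
        simp [PySem.List.pyGetD_of_nonneg]
      · rw [dif_neg (by simp only [List.length_cons]; push_cast; omega), PySem.Dict.get?_insert_of_ne d _ h2]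

-- common reference: prev = right-indices of the strands already placed, k = current left index
def pvGo (rs : List Int) (prev : List Int) (k : Int) : List Int → List Int
  | [] => []
  | m :: t =>
      PySem.List.pyRange k (k - ((prev.countP (fun w => pvVal rs m < w) : Nat) : Int)) (-1)
        ++ pvGo rs (prev ++ [pvVal rs m]) (k + 1) t

theorem pyRange_neg_map_succ (a b : Int) :
    (PySem.List.pyRange a b (-1)).map (fun j => j + 1) = PySem.List.pyRange (a + 1) (b + 1) (-1) := by
  rw [PySem.List.pyRange_neg_one, PySem.List.pyRange_neg_one, List.map_map]
  have : a + 1 - (b + 1) = a - b := by ring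
  rw [this]
  exact List.map_congr_left (fun x _ => by simp; ring)

-- the values A reads from the permutation dict are the first k entries of ls.map pvVal
theorem permDict_prefix (ls rs : List Int) (k : Nat) (hk : k ≤ ls.length) :
    (PySem.List.pyRange 0 (k : Int) 1).map
      (fun i => ((PySem.List.enumerate ls 0).foldl
        (fun (d : PySem.Dict Int Int) p => d.insert p.1 (pvVal rs p.2)) PySem.Dict.empty).getD i 0)
    = (ls.map (pvVal rs)).take k := by
  apply List.ext_getElem
  · simp [PySem.List.length_pyRange_one]; omega
  · intro j hj1 hj2
    have hjk : j < k := by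
      have := PySem.List.length_pyRange_one (0 : Int) (k : Int)
      simp at hj1
      omega
    have hjn : j < ls.length := lt_of_lt_of_le hjk hk
    rw [List.getElem_map]
    rw [PySem.List.getElem_pyRange_one]
    · rw [PySem.Dict.getD, permFold_get rs ls 0 PySem.Dict.empty _]
      rw [dif_pos (by refine ⟨by omega, ?_⟩; push_cast; omega)]
      simp only [Option.getD_some]
      rw [List.getElem_take, List.getElem_map]
      congr 1
      rw [PySem.List.pyGetD_eq_getElem _ _ (by omega) (by simp; omega)]
      congr 1
      omega

theorem count_prefix (r : Int) (l : List Int) :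
    (l.map (fun w => if r < w then (1 : Int) else 0)).sum = ((l.countP (fun w => r < w) : Nat) : Int) := by
  have := PySem.List.sum_map_ite_one_zero (fun w => decide (r < w)) l
  simpa using this

theorem braidA_loop (ls rs : List Int) :
    ∀ (t : List Int) (k : Nat), ls.drop k = t → ∀ (rw : List Int),
    (PySem.List.enumerate t (k : Int)).foldl
      (fun rw p =>
        rw ++ (PySem.List.pyRange (p.1 - 1)
          (p.1 - ((PySem.List.pyRange 0 p.1 1).map
            (fun i => if ((PySem.List.enumerate ls 0).foldl
                (fun (d : PySem.Dict Int Int) p => d.insert p.1 (pvVal rs p.2)) PySem.Dict.empty).getD i 0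
                > ((PySem.List.enumerate ls 0).foldl
                (fun (d : PySem.Dict Int Int) p => d.insert p.1 (pvVal rs p.2)) PySem.Dict.empty).getD p.1 0
              then (1 : Int) else 0)).sum - 1) (-1)).map (fun j => j + 1)) rw
    = rw ++ pvGo rs ((ls.map (pvVal rs)).take k) (k : Int) t := by
  intro t
  induction t with
  | nil => intro k _ rw; simp [PySem.List.enumerate, pvGo]
  | cons m t' ih =>
    intro k hdrop rw
    have hk : k < ls.length := by
      by_contra hle
      rw [List.drop_eq_nil_of_le (by omega)] at hdrop
      simp at hdrop
    have hm : ls[k] = m := by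
      have h0 : (ls.drop k)[0]'(by rw [hdrop]; simp) = m := by
        simp [hdrop]
      rw [List.getElem_drop] at h0
      simpa using h0
    have hdrop' : ls.drop (k + 1) = t' := by
      have : ls.drop (k+1) = (ls.drop k).tail := by rw [List.tail_drop]
      rw [this, hdrop]; rfl
    rw [PySem.List.enumerate_cons, List.foldl_cons]
    have hr : ((PySem.List.enumerate ls 0).foldl
        (fun (d : PySem.Dict Int Int) p => d.insert p.1 (pvVal rs p.2)) PySem.Dict.empty).getD (k : Int) 0
        = pvVal rs m := by
      rw [PySem.Dict.getD, permFold_get rs ls 0 PySem.Dict.empty _,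
        dif_pos (by refine ⟨by omega, ?_⟩; push_cast; omega)]
      simp only [Option.getD_some]
      rw [PySem.List.pyGetD_eq_getElem _ _ (by omega) (by push_cast; omega)]
      simp only [Int.sub_zero, Int.toNat_natCast]
      rw [hm]
    have hcount : ((PySem.List.pyRange 0 (k : Int) 1).map
        (fun i => if ((PySem.List.enumerate ls 0).foldl
            (fun (d : PySem.Dict Int Int) p => d.insert p.1 (pvVal rs p.2)) PySem.Dict.empty).getD i 0 > pvVal rs m
          then (1 : Int) else 0)).sum
        = (((ls.map (pvVal rs)).take k).countP (fun w => pvVal rs m < w) : Nat) := by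
      rw [← count_prefix (pvVal rs m)]
      rw [← permDict_prefix ls rs k (le_of_lt hk), List.map_map]
      rfl
    set c : Nat := ((ls.map (pvVal rs)).take k).countP (fun w => pvVal rs m < w) with hc
    have hpiece : (PySem.List.pyRange ((k : Int) - 1) ((k : Int) - (c : Int) - 1) (-1)).map (fun j => j + 1)
        = PySem.List.pyRange (k : Int) ((k : Int) - (c : Int)) (-1) := by
      rw [pyRange_neg_map_succ]
      congr 1 <;> ring
    have hstep : (rw ++ (PySem.List.pyRange ((k:Int) - 1)
          ((k:Int) - ((PySem.List.pyRange 0 (k:Int) 1).map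
            (fun i => if ((PySem.List.enumerate ls 0).foldl
                (fun (d : PySem.Dict Int Int) p => d.insert p.1 (pvVal rs p.2)) PySem.Dict.empty).getD i 0
                > ((PySem.List.enumerate ls 0).foldl
                (fun (d : PySem.Dict Int Int) p => d.insert p.1 (pvVal rs p.2)) PySem.Dict.empty).getD (k:Int) 0
              then (1 : Int) else 0)).sum - 1) (-1)).map (fun j => j + 1))
        = rw ++ PySem.List.pyRange (k : Int) ((k : Int) - (c : Int)) (-1) := by
      rw [hr, hcount, hpiece]
    rw [hstep]
    have ih' := ih (k + 1) hdrop' (rw ++ PySem.List.pyRange (k : Int) ((k : Int) - (c : Int)) (-1))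
    push_cast at ih'
    rw [ih']
    have htake : (ls.map (pvVal rs)).take (k + 1)
        = (ls.map (pvVal rs)).take k ++ [pvVal rs m] := by
      rw [← List.take_concat_get (l := ls.map (pvVal rs)) (i := k) (by simpa using hk)]
      rw [List.concat_eq_append, List.getElem_map, hm]
    rw [pvGo]
    push_cast
    rw [htake, List.append_assoc]


-- countP (r < ·) on a sorted list = length - bisectRight
theorem countP_gt_of_sorted (xs : List Int) (r : Int) (hs : xs.Pairwise (· ≤ ·)) :
    xs.countP (fun w => r < w) = xs.length - PySem.List.bisectRight xs r ∧
    PySem.List.bisectRight xs r ≤ xs.length := by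
  obtain ⟨hle, hlo, hhi⟩ := PySem.List.bisectRight_spec xs r hs
  set lo := PySem.List.bisectRight xs r with hlodef
  refine ⟨?_, hle⟩
  have hsplit : xs = xs.take lo ++ xs.drop lo := (List.take_append_drop lo xs).symm
  rw [hsplit, List.countP_append]
  have h1 : (xs.take lo).countP (fun w => r < w) = 0 := by
    rw [List.countP_eq_zero]
    intro a ha
    obtain ⟨j, hj, hja⟩ := List.mem_iff_getElem.mp ha
    have hjlen : j < xs.length := by
      have := List.length_take_le lo xs; omega
    have hjlo : j < lo := by
      have := hj; simp [List.length_take] at this; omega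
    rw [List.getElem_take] at hja
    have := hlo j hjlen hjlo
    rw [hja] at this
    simp; omega
  have h2 : (xs.drop lo).countP (fun w => r < w) = (xs.drop lo).length := by
    rw [List.countP_eq_length]
    intro a ha
    obtain ⟨j, hj, hja⟩ := List.mem_iff_getElem.mp ha
    rw [List.getElem_drop] at hja
    have hjlen : lo + j < xs.length := by
      have := hj; simp [List.length_drop] at this; omega
    have := hhi (lo + j) hjlen (by omega)
    rw [hja] at this
    simp; omega
  rw [h1, h2]
  simp [List.length_take, List.length_drop]

-- inserting at the bisectRight position keeps the list sorted
theorem sorted_insert_bisect (xs : List Int) (r : Int) (hs : xs.Pairwise (· ≤ ·)) :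
    (xs.take (PySem.List.bisectRight xs r) ++ r :: xs.drop (PySem.List.bisectRight xs r)).Pairwise (· ≤ ·) := by
  obtain ⟨hle, hlo, hhi⟩ := PySem.List.bisectRight_spec xs r hs
  set lo := PySem.List.bisectRight xs r with hlodef
  rw [List.pairwise_append]
  refine ⟨hs.sublist (List.take_sublist lo xs), ?_, ?_⟩
  · rw [List.pairwise_cons]
    refine ⟨?_, hs.sublist (List.drop_sublist lo xs)⟩
    intro a ha
    obtain ⟨j, hj, hja⟩ := List.mem_iff_getElem.mp ha
    rw [List.getElem_drop] at hja
    have hjlen : lo + j < xs.length := by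
      have := hj; simp [List.length_drop] at this; omega
    have := hhi (lo + j) hjlen (by omega)
    rw [hja] at this; omega
  · intro a ha b hb
    obtain ⟨j, hj, hja⟩ := List.mem_iff_getElem.mp ha
    have hjlen : j < xs.length := by
      have := List.length_take_le lo xs; omega
    have hjlo : j < lo := by
      have := hj; simp [List.length_take] at this; omega
    rw [List.getElem_take] at hja
    have har : a ≤ r := by
      have := hlo j hjlen hjlo; rw [hja] at this; exact this
    rcases List.mem_cons.mp hb with hb | hb
    · omega
    · obtain ⟨j', hj', hjb⟩ := List.mem_iff_getElem.mp hb
      rw [List.getElem_drop] at hjb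
      have hjlen' : lo + j' < xs.length := by
        have := hj'; simp [List.length_drop] at this; omega
      have := hhi (lo + j') hjlen' (by omega)
      rw [hjb] at this; omega

theorem braidB_loop (rs : List Int) (pos : PySem.Dict Int Int) :
    ∀ (t : List Int) (k : Int) (rw seen prev : List Int),
    (∀ m ∈ t, pos.get? m = some (pvVal rs m)) →
    seen.Pairwise (· ≤ ·) → seen.Perm prev →
    ∃ fin, (PySem.List.enumerate t k).foldlM
      (fun (st : List Int × List Int) p =>
        (pos.get? p.2).map (fun r =>
          (st.1 ++ PySem.List.pyRange p.1 (p.1 - ((st.2.length : Int) - ((PySem.List.bisectRight st.2 r : Nat) : Int))) (-1),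
           PySem.List.insert st.2 (((PySem.List.bisectRight st.2 r : Nat) : Int)) r)))
      (rw, seen)
    = some (rw ++ pvGo rs prev k t, fin) := by
  intro t
  induction t with
  | nil =>
    intro k rw seen prev _ _ _
    exact ⟨seen, by simp [PySem.List.enumerate, pvGo]⟩
  | cons m t' ih =>
    intro k rw seen prev h hs hperm
    rw [PySem.List.enumerate_cons, List.foldlM_cons]
    rw [h m List.mem_cons_self]
    simp only [Option.map_some, Option.bind_eq_bind, Option.bind_some, pure]
    set r := pvVal rs m with hr
    obtain ⟨hcount, hle⟩ := countP_gt_of_sorted seen r hs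
    have hinsert : PySem.List.insert seen ((PySem.List.bisectRight seen r : Nat) : Int) r
        = seen.take (PySem.List.bisectRight seen r) ++ r :: seen.drop (PySem.List.bisectRight seen r) :=
      PySem.List.insert_natCast seen _ r hle
    have hc : ((seen.length : Int) - ((PySem.List.bisectRight seen r : Nat) : Int))
        = ((prev.countP (fun w => r < w) : Nat) : Int) := by
      rw [← hperm.countP_eq, hcount]
      push_cast [Nat.cast_sub hle]
      ring
    rw [hinsert, hc]
    have hs' : (seen.take (PySem.List.bisectRight seen r) ++ r :: seen.drop (PySem.List.bisectRight seen r)).Pairwise (· ≤ ·) :=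
      sorted_insert_bisect seen r hs
    have hperm' : (seen.take (PySem.List.bisectRight seen r) ++ r :: seen.drop (PySem.List.bisectRight seen r)).Perm (prev ++ [r]) := by
      have p1 : (seen.take (PySem.List.bisectRight seen r) ++ r :: seen.drop (PySem.List.bisectRight seen r)).Perm (r :: seen) := by
        have := List.perm_middle (a := r) (l₁ := seen.take (PySem.List.bisectRight seen r)) (l₂ := seen.drop (PySem.List.bisectRight seen r))
        rwa [List.take_append_drop] at this
      exact (p1.trans (hperm.cons r)).trans (List.perm_append_singleton r prev).symm
    obtain ⟨fin, hfin⟩ := ih (k + 1)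
      (rw ++ PySem.List.pyRange k (k - ((prev.countP (fun w => r < w) : Nat) : Int)) (-1))
      _ (prev ++ [r]) (fun x hx => h x (List.mem_cons_of_mem _ hx)) hs' hperm'
    refine ⟨fin, ?_⟩
    rw [hfin, pvGo]
    rw [List.append_assoc]

theorem braid_ref_A (left_state right_state : List Int)
    (h : ∀ m ∈ left_state, m ∈ right_state) :
    braid_from_marked_state left_state right_state = pvGo right_state [] 0 left_state := by
  unfold braid_from_marked_state
  rw [permFold_some right_state left_state 0 PySem.Dict.empty h]
  have := braidA_loop left_state right_state left_state 0 rfl []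
  simpa using this

theorem braid_ref_B (left_state right_state : List Int)
    (h : ∀ m ∈ left_state, m ∈ right_state) :
    braid_from_marked_state_alt left_state right_state = pvGo right_state [] 0 left_state := by
  have hpos : ∀ m ∈ left_state,
      ((PySem.List.enumerate right_state).foldl
        (fun (d : PySem.Dict Int Int) p => if d.contains p.2 then d else d.insert p.2 p.1)
        PySem.Dict.empty).get? m = some (pvVal right_state m) := by
    intro m hm
    rw [posFold_get right_state 0 PySem.Dict.empty m]
    obtain ⟨n, hn⟩ := Option.isSome_iff_exists.mp
      ((PySem.List.index?_isSome_iff right_state m).mpr (h m hm))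
    rw [hn]
    simp only [PySem.Dict.contains_empty, if_false, Option.map_some, pvVal, hn, Option.getD_some]
    norm_num
  obtain ⟨fin, hfin⟩ := braidB_loop right_state _ left_state 0 [] [] [] hpos List.Pairwise.nil (List.Perm.refl [])
  unfold braid_from_marked_state_alt
  show (match (PySem.List.enumerate left_state).foldlM
      (fun (st : List Int × List Int) p =>
        (((PySem.List.enumerate right_state).foldl
          (fun (d : PySem.Dict Int Int) p => if d.contains p.2 then d else d.insert p.2 p.1)
          PySem.Dict.empty).get? p.2).map (fun r =>
          (st.1 ++ PySem.List.pyRange p.1 (p.1 - ((st.2.length : Int) - ((PySem.List.bisectRight st.2 r : Nat) : Int))) (-1),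
           PySem.List.insert st.2 (((PySem.List.bisectRight st.2 r : Nat) : Int)) r)))
      (([] : List Int), ([] : List Int)) with
  | none => []
  | some st => st.1) = pvGo right_state [] 0 left_state
  rw [hfin]
  simp

-- ===== VERDICT (by name: the statement is the Claim_ definition above) =====
theorem braid_from_marked_state_spec : Claim_equal_braid_from_marked_state := by
  intro ls rs _ hpre
  unfold Spec_braid_from_marked_state
  rw [braid_ref_A ls rs hpre, braid_ref_B ls rs hpre]
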